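-- pv_equiv track=rewrite | github.com/wantonsolutions/CSE202 | project/climbing.py | get_all_holds_highest_fist
-- ===== SOURCE A (Python) =====
-- def get_all_holds_highest_fist(wall):
--     holds = []
--     for i in range(len(wall)):
--         for j in range(len(wall[i])):
--             if wall[i][j] == 1:
--                 holds.append((i, j))
--
--     hholds = sorted(holds, key=lambda v: v[0], reverse=True)
--     return hholds
-- ===== SOURCE B (Python) =====
-- def get_all_holds_highest_fist(wall):
--     return [(i, j)
--             for i, row in reversed(list(enumerate(wall)))
--             for j, v in enumerate(row)
--             if v == 1]
-- ===== Notes on version B (the rewrite author's own statement) =====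
-- stated objective: alternative
-- what changed: B is a single comprehension over reversed(enumerate(wall)): it emits holds row by row in descending row order directly, eliminating A's collect-then-stable-sort pass entirely.
import Mathlib
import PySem

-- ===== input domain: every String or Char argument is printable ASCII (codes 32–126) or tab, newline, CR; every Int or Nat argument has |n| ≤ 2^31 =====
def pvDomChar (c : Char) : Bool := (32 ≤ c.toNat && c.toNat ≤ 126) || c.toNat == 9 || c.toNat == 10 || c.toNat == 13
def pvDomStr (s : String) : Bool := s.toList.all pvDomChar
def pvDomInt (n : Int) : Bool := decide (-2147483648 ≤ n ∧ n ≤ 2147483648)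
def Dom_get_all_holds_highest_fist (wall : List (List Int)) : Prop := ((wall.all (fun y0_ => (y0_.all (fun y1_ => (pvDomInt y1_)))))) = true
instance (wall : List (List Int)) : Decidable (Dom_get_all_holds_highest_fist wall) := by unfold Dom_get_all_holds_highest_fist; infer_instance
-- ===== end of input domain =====

-- B emits the holds in a single comprehension over reversed(enumerate(wall)): descending row
-- order comes from the traversal, so A's stable reverse sort is not needed.

-- ===== PORT A =====
-- wall[i] / wall[i][j]: indices come from range(len(..)), always in range, so pyGetD is exact here.
def get_all_holds_highest_fist (wall : List (List Int)) : List (Int × Int) :=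
  let holds : List (Int × Int) :=
    (PySem.List.pyRange 0 (PySem.List.len wall) 1).foldl (fun acc i =>
      let row := PySem.List.pyGetD wall i []
      (PySem.List.pyRange 0 (PySem.List.len row) 1).foldl (fun acc2 j =>
        if PySem.List.pyGetD row j 0 = 1 then acc2 ++ [(i, j)] else acc2) acc) []
  PySem.List.sorted holds (fun v => v.1) true

-- ===== PORT B =====
-- [(i, j) for i, row in reversed(list(enumerate(wall))) for j, v in enumerate(row) if v == 1]
def get_all_holds_highest_fist_alt (wall : List (List Int)) : List (Int × Int) :=
  ((PySem.List.enumerate wall).reverse).flatMap (fun p =>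
    (PySem.List.enumerate p.2).filterMap (fun q =>
      if q.2 = 1 then some (p.1, q.1) else none))

-- ===== PRECONDITION & SPEC =====
def Spec_get_all_holds_highest_fist (wall : List (List Int)) (out : List (Int × Int)) : Prop := out = get_all_holds_highest_fist_alt wall
instance (wall : List (List Int)) (out : List (Int × Int)) : Decidable (Spec_get_all_holds_highest_fist wall out) := by unfold Spec_get_all_holds_highest_fist; infer_instance

-- ===== CLAIM (what is proved, stated in full; the proofs are below) =====
def Claim_equal_get_all_holds_highest_fist : Prop := ∀ (wall : List (List Int)), Dom_get_all_holds_highest_fist wall → Spec_get_all_holds_highest_fist wall (get_all_holds_highest_fist wall)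

-- ===== LEMMAS AND PROOFS =====

-- the holds contributed by one row
def pvRowH (i : Int) (row : List Int) : List (Int × Int) :=
  ((List.range row.length).filter (fun j => row.getD j 0 = 1)).map (fun (j : Nat) => (i, (j : Int)))

-- block k = holds of row k
def pvBk (wall : List (List Int)) (k : Nat) : List (Int × Int) := pvRowH (k : Int) (wall.getD k [])

def pvBs (wall : List (List Int)) (n : Nat) : List (List (Int × Int)) := (List.range n).map (pvBk wall)

-- the insertion function of PySem's reverse sort with key fst
def pvIns (acc : List (Int × Int)) (x : Int × Int) : List (Int × Int) :=
  PySem.List.insertBy (fun a b => decide (b.1 < a.1)) x acc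

theorem pvRowH_fst {i : Int} {row : List Int} {x : Int × Int} (hx : x ∈ pvRowH i row) : x.1 = i := by
  simp [pvRowH] at hx
  obtain ⟨j, _, hj⟩ := hx
  simp [← hj]

theorem pv_inner_fold (i : Int) (row : List Int) (acc : List (Int × Int)) :
    (PySem.List.pyRange 0 (PySem.List.len row) 1).foldl (fun acc2 j =>
        if PySem.List.pyGetD row j 0 = 1 then acc2 ++ [(i, j)] else acc2) acc
      = acc ++ pvRowH i row := by
  have h := PySem.List.foldl_append_if (fun j => decide (PySem.List.pyGetD row j 0 = 1))
      (fun j => ((i, j) : Int × Int)) (PySem.List.pyRange 0 (PySem.List.len row) 1) acc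
  simp only [decide_eq_true_eq] at h
  rw [h]
  congr 1
  rw [PySem.List.pyRange_one]
  simp only [zero_add]
  rw [List.filter_map, List.map_map]
  simp only [pvRowH, Function.comp_def, PySem.List.pyGetD_natCast, PySem.List.len]
  simp

theorem pv_outer_fold (wall : List (List Int)) (idxs : List Int) (acc : List (Int × Int)) :
    idxs.foldl (fun acc i =>
      let row := PySem.List.pyGetD wall i []
      (PySem.List.pyRange 0 (PySem.List.len row) 1).foldl (fun acc2 j =>
        if PySem.List.pyGetD row j 0 = 1 then acc2 ++ [(i, j)] else acc2) acc) acc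
      = acc ++ idxs.flatMap (fun i => pvRowH i (PySem.List.pyGetD wall i [])) := by
  simp only [pv_inner_fold]
  exact PySem.List.foldl_append_eq_flatMap _ idxs acc

theorem pv_holdsA (wall : List (List Int)) :
    (PySem.List.pyRange 0 (PySem.List.len wall) 1).foldl (fun acc i =>
      let row := PySem.List.pyGetD wall i []
      (PySem.List.pyRange 0 (PySem.List.len row) 1).foldl (fun acc2 j =>
        if PySem.List.pyGetD row j 0 = 1 then acc2 ++ [(i, j)] else acc2) acc) []
      = (pvBs wall wall.length).flatten := by
  rw [pv_outer_fold]
  rw [PySem.List.pyRange_one]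
  simp only [PySem.List.len, List.nil_append, List.flatMap_map, List.flatten_eq_flatMap, pvBs,
    List.flatMap_map]
  refine List.flatMap_congr ?_
  intro k _
  simp [pvBk, PySem.List.pyGetD_natCast]

-- B's inner comprehension over one row is exactly that row's block
theorem pv_filterMap_gen (i : Int) (row : List Int) (l : List Nat) :
    (l.map (fun (j : Nat) => (((j : Int), row.getD j 0) : Int × Int))).filterMap (fun q =>
        if q.2 = 1 then some (i, q.1) else none)
      = ((l.filter (fun j => row.getD j 0 = 1)).map (fun (j : Nat) => ((i, (j : Int)) : Int × Int))) := by
  induction l with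
  | nil => simp
  | cons j t ih =>
    simp only [List.map_cons, List.filterMap_cons, List.filter_cons]
    by_cases h : row[j]?.getD 0 = 1 <;>
      simp [h, List.getD] <;>
      simpa [List.getD, Function.comp_def] using ih

theorem pv_filterMap_row (i : Int) (row : List Int) :
    (PySem.List.enumerate row).filterMap (fun q =>
        if q.2 = 1 then some (i, q.1) else none)
      = pvRowH i row := by
  have he : PySem.List.enumerate row
      = (List.range row.length).map (fun (j : Nat) => (((j : Int), row.getD j 0) : Int × Int)) := by
    rw [PySem.List.enumerate_eq_map_pyRange (d := 0), PySem.List.pyRange_one, List.map_map]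
    have h1 : ((PySem.List.len row) - 0).toNat = row.length := by simp [PySem.List.len]
    rw [h1]
    refine List.map_congr_left ?_
    intro j _
    simp [PySem.List.pyGetD_natCast]
  rw [he, pv_filterMap_gen]
  rfl

theorem pv_holdsB (wall : List (List Int)) :
    get_all_holds_highest_fist_alt wall = ((pvBs wall wall.length).reverse).flatten := by
  unfold get_all_holds_highest_fist_alt
  simp only [pv_filterMap_row]
  rw [List.flatten_eq_flatMap, pvBs, ← List.map_reverse, List.flatMap_map]
  have he : PySem.List.enumerate wall
      = (List.range wall.length).map (fun (k : Nat) => (((k : Int), wall.getD k []) : Int × List Int)) := by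
    rw [PySem.List.enumerate_eq_map_pyRange (d := []), PySem.List.pyRange_one, List.map_map]
    have h1 : ((PySem.List.len wall) - 0).toNat = wall.length := by simp [PySem.List.len]
    rw [h1]
    refine List.map_congr_left ?_
    intro k _
    simp [PySem.List.pyGetD_natCast]
  rw [he, ← List.map_reverse, List.flatMap_map]
  rfl

-- insert in the middle: skipped by the prefix, placed before the first element of q
theorem pv_ins_mid {α : Type} (bef : α → α → Bool) (x : α) (p q : List α)
    (hp : ∀ y ∈ p, bef x y = false) (hq : ∀ z, q.head? = some z → bef x z = true) :
    PySem.List.insertBy bef x (p ++ q) = p ++ x :: q := by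
  induction p with
  | nil =>
    cases q with
    | nil => simp [PySem.List.insertBy]
    | cons z t => simp [PySem.List.insertBy, hq z rfl]
  | cons y p' ih =>
    have hy : bef x y = false := hp y (by simp)
    cases p' <;> cases q <;>
      simp_all [PySem.List.insertBy]

theorem pv_fold_block (b : List (Int × Int)) (i : Int) (hb : ∀ x ∈ b, x.1 = i)
    (acc : List (Int × Int)) (hacc : ∀ y ∈ acc, y.1 < i) :
    ∀ p : List (Int × Int), (∀ x ∈ p, x.1 = i) →
      b.foldl pvIns (p ++ acc) = (p ++ b) ++ acc := by
  induction b with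
  | nil => intro p _; simp
  | cons x t ih =>
    intro p hp
    have hx : x.1 = i := hb x (by simp)
    have hstep : pvIns (p ++ acc) x = (p ++ [x]) ++ acc := by
      unfold pvIns
      rw [pv_ins_mid _ x p acc]
      · simp
      · intro y hy
        simp [hp y hy, hx]
      · intro z hz
        have hz' : z ∈ acc := List.mem_of_mem_head? hz
        simp [hacc z hz', hx]
    simp only [List.foldl_cons, hstep]
    rw [ih (fun y hy => hb y (by simp [hy])) (p ++ [x])
      (by intro y hy
          rcases List.mem_append.1 hy with h | h
          · exact hp y h
          · simp at h; simp [h, hx])]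
    simp

theorem pv_bk_fst {wall : List (List Int)} {k : Nat} {x : Int × Int} (hx : x ∈ pvBk wall k) :
    x.1 = (k : Int) := pvRowH_fst hx

theorem pv_fold_blocks (wall : List (List Int)) (n : Nat) :
    (pvBs wall n).flatten.foldl pvIns [] = ((pvBs wall n).reverse).flatten := by
  induction n with
  | zero => simp [pvBs]
  | succ n ih =>
    have hbs : pvBs wall (n + 1) = pvBs wall n ++ [pvBk wall n] := by
      simp [pvBs, List.range_succ]
    rw [hbs]
    simp only [List.flatten_append, List.foldl_append, ih, List.flatten_cons, List.flatten_nil,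
      List.append_nil]
    have hacc : ∀ y ∈ ((pvBs wall n).reverse).flatten, y.1 < (n : Int) := by
      intro y hy
      simp only [List.mem_flatten, List.mem_reverse, pvBs, List.mem_map, List.mem_range] at hy
      obtain ⟨l, ⟨k, hk, hl⟩, hyl⟩ := hy
      have := pv_bk_fst (wall := wall) (k := k) (hl ▸ hyl)
      rw [this]
      exact_mod_cast hk
    have := pv_fold_block (pvBk wall n) (n : Int) (fun x hx => pv_bk_fst hx)
      ((pvBs wall n).reverse).flatten hacc [] (by simp)
    simp only [List.nil_append] at this
    rw [this]
    simp

-- ===== VERDICT (by name: the statement is the Claim_ definition above) =====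
theorem get_all_holds_highest_fist_spec : Claim_equal_get_all_holds_highest_fist := by
  intro wall _
  unfold Spec_get_all_holds_highest_fist get_all_holds_highest_fist
  rw [pv_holdsB]
  simp only [pv_holdsA]
  rw [PySem.List.sorted_rev_eq_foldl_insertBy]
  exact pv_fold_blocks wall wall.length
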